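-- pv_equiv track=rewrite | github.com/sec-js/cartography | cartography/intel/tailscale/grants.py | _build_device_postures_map
-- ===== SOURCE A (Python) =====
-- def _build_device_postures_map(
--     posture_matches: list[dict[str, str]],
-- ) -> dict[str, set[str]]:
--     """Build a mapping from device ID to set of posture IDs it conforms to."""
--     device_postures: dict[str, set[str]] = {}
--     for match in posture_matches:
--         device_postures.setdefault(match["device_id"], set()).add(
--             match["posture_id"],
--         )
--     return device_postures
-- ===== SOURCE B (Python) =====
-- def _build_device_postures_map(
--     posture_matches: list[dict[str, str]],
-- ) -> dict[str, set[str]]: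
--     """Build a mapping from device ID to set of posture IDs it conforms to."""
--     device_ids: list[str] = []
--     for match in posture_matches:
--         if match["device_id"] not in device_ids:
--             device_ids.append(match["device_id"])
--     return {
--         d: {m["posture_id"] for m in posture_matches if m["device_id"] == d}
--         for d in device_ids
--     }
-- ===== Notes on version B (the rewrite author's own statement) =====
-- stated objective: alternative
-- what changed: A builds the dict in one pass with setdefault(...).add(...); B first collects the distinct device ids in a dedup pass, then builds each device's posture set with a comprehension over the matches (two-pass group-by instead of single-pass accumulation).
import Mathlib
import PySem

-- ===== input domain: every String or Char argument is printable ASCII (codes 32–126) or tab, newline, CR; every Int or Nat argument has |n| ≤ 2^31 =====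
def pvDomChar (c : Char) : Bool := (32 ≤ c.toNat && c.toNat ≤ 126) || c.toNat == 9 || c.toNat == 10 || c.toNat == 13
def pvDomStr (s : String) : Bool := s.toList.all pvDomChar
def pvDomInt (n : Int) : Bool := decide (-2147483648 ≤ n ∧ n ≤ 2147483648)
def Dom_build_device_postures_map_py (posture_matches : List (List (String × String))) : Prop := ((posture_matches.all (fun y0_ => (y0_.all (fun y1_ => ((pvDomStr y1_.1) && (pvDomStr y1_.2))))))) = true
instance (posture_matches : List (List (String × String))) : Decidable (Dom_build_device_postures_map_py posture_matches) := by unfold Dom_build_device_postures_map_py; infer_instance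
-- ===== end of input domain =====

-- B replaces A's single-pass setdefault/add dict accumulation by a two-pass plan: collect the
-- distinct device ids in first-appearance order, then build each posture set by a comprehension
-- over the matches; same return value (objective: alternative, not faster).

-- ===== PORT A =====
-- m["key"] on a dict[str, str]: first-match lookup (none = KeyError, excluded by Pre_)
def pvGetKey (m : List (String × String)) (k : String) : Option String :=
  (PySem.Dict.mk m).get? k

def build_device_postures_map_py (posture_matches : List (List (String × String))) : List (String × List String) :=
  (posture_matches.foldl (fun device_postures m =>
      match pvGetKey m "device_id", pvGetKey m "posture_id" with
      | some d, some p =>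
          -- device_postures.setdefault(d, set()).add(p)
          device_postures.modify d PySem.Set.empty (fun s => PySem.Set.add s p)
      | _, _ => device_postures   -- KeyError in Python; unreachable under Pre_
    ) PySem.Dict.empty).items

-- ===== PORT B =====
def build_device_postures_map_py_alt (posture_matches : List (List (String × String))) : List (String × List String) :=
  let device_ids : List String := posture_matches.foldl (fun acc m =>
      match pvGetKey m "device_id" with
      | some d => if acc.contains d then acc else acc ++ [d]
      | none => acc   -- KeyError in Python; unreachable under Pre_
    ) []
  device_ids.map (fun d =>
    (d, PySem.Set.ofList
          ((posture_matches.filter (fun m => pvGetKey m "device_id" == some d)).filterMap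
            (fun m => pvGetKey m "posture_id"))))

-- ===== PRECONDITION & SPEC =====
-- Pre_ excludes exactly the matches missing a "device_id" or "posture_id" key, on which A raises KeyError.
def Pre_build_device_postures_map_py (posture_matches : List (List (String × String))) : Prop :=
  ∀ m ∈ posture_matches, "device_id" ∈ m.map Prod.fst ∧ "posture_id" ∈ m.map Prod.fst
instance (posture_matches : List (List (String × String))) : Decidable (Pre_build_device_postures_map_py posture_matches) := by unfold Pre_build_device_postures_map_py; infer_instance

def pvWitness_build_device_postures_map_py : (List (List (String × String))) :=
  [[("device_id", "d1"), ("posture_id", "p1")], [("device_id", "d1"), ("posture_id", "p2")]]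

def Spec_build_device_postures_map_py (posture_matches : List (List (String × String))) (out : List (String × List String)) : Prop := out = build_device_postures_map_py_alt posture_matches
instance (posture_matches : List (List (String × String))) (out : List (String × List String)) : Decidable (Spec_build_device_postures_map_py posture_matches out) := by unfold Spec_build_device_postures_map_py; infer_instance

-- ===== CLAIM (what is proved, stated in full; the proofs are below) =====
def Claim_equal_build_device_postures_map_py : Prop := ∀ (posture_matches : List (List (String × String))), Dom_build_device_postures_map_py posture_matches → Pre_build_device_postures_map_py posture_matches → Spec_build_device_postures_map_py posture_matches (build_device_postures_map_py posture_matches)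

-- ===== LEMMAS AND PROOFS =====

-- the device ids occurring in pm, in order (with multiplicity)
def pvIdsRaw (pm : List (List (String × String))) : List String :=
  pm.filterMap (fun m => pvGetKey m "device_id")

-- the posture ids of the matches for device k, in order (with multiplicity)
def pvVals (pm : List (List (String × String))) (k : String) : List String :=
  (pm.filter (fun m => pvGetKey m "device_id" == some k)).filterMap (fun m => pvGetKey m "posture_id")

theorem pvGetKey_isSome (m : List (String × String)) (k : String)
    (h : k ∈ m.map Prod.fst) : (pvGetKey m k).isSome := by
  rw [pvGetKey, Option.isSome_iff_ne_none]
  intro hn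
  rw [PySem.Dict.get?_eq_none_iff_not_mem_keys] at hn
  exact hn (by simpa [PySem.Dict.keys_mk] using h)

theorem pvFoldA_getD (pm : List (List (String × String)))
    (dp : PySem.Dict String (PySem.Set String))
    (hpre : ∀ m ∈ pm, "device_id" ∈ m.map Prod.fst ∧ "posture_id" ∈ m.map Prod.fst)
    (k : String) :
    (pm.foldl (fun device_postures m =>
        match pvGetKey m "device_id", pvGetKey m "posture_id" with
        | some d, some p => device_postures.modify d PySem.Set.empty (fun s => PySem.Set.add s p)
        | _, _ => device_postures) dp).getD k PySem.Set.empty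
      = PySem.Set.update (dp.getD k PySem.Set.empty) (pvVals pm k) := by
  induction pm generalizing dp with
  | nil => rfl
  | cons m rest ih =>
    obtain ⟨hd, hp⟩ := hpre m (List.mem_cons_self ..)
    obtain ⟨d, hd⟩ := Option.isSome_iff_exists.mp (pvGetKey_isSome m _ hd)
    obtain ⟨p, hp⟩ := Option.isSome_iff_exists.mp (pvGetKey_isSome m _ hp)
    have hrest := fun x hx => hpre x (List.mem_cons_of_mem _ hx)
    rw [List.foldl_cons]
    simp only [hd, hp]
    rw [ih _ hrest, PySem.Dict.getD_modify]
    by_cases hk : k = d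
    · subst hk
      rw [if_pos rfl]
      have : pvVals (m :: rest) k = p :: pvVals rest k := by
        simp [pvVals, hd, hp]
      rw [this]
      rfl
    · rw [if_neg hk]
      have : pvVals (m :: rest) k = pvVals rest k := by
        have : (pvGetKey m "device_id" == some k) = false := by
          simp [hd]; exact fun h => hk h.symm
        simp [pvVals, this]
      rw [this]

theorem pvFoldA_keys (pm : List (List (String × String)))
    (dp : PySem.Dict String (PySem.Set String))
    (hpre : ∀ m ∈ pm, "device_id" ∈ m.map Prod.fst ∧ "posture_id" ∈ m.map Prod.fst) :
    (pm.foldl (fun device_postures m =>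
        match pvGetKey m "device_id", pvGetKey m "posture_id" with
        | some d, some p => device_postures.modify d PySem.Set.empty (fun s => PySem.Set.add s p)
        | _, _ => device_postures) dp).keys
      = PySem.Set.update dp.keys (pvIdsRaw pm) := by
  induction pm generalizing dp with
  | nil => rfl
  | cons m rest ih =>
    obtain ⟨hd, hp⟩ := hpre m (List.mem_cons_self ..)
    obtain ⟨d, hd⟩ := Option.isSome_iff_exists.mp (pvGetKey_isSome m _ hd)
    obtain ⟨p, hp⟩ := Option.isSome_iff_exists.mp (pvGetKey_isSome m _ hp)
    have hrest := fun x hx => hpre x (List.mem_cons_of_mem _ hx)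
    rw [List.foldl_cons]
    simp only [hd, hp]
    rw [ih _ hrest]
    have hids : pvIdsRaw (m :: rest) = d :: pvIdsRaw rest := by
      simp [pvIdsRaw, hd]
    rw [hids]
    have hkeys : (dp.modify d PySem.Set.empty (fun s => PySem.Set.add s p)).keys
        = PySem.Set.add dp.keys d := by
      rw [PySem.Dict.keys_modify]
      by_cases hc : dp.contains d = true
      · rw [PySem.Dict.keys_insert_of_contains _ _ hc]
        have hmem : d ∈ dp.keys := (PySem.Dict.contains_iff_mem_keys _ _).mp hc
        simp [PySem.Set.add, PySem.Set.contains, hmem]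
      · rw [PySem.Dict.keys_insert_of_not_contains _ _ (by simpa using hc)]
        have hmem : d ∉ dp.keys := fun h => hc ((PySem.Dict.contains_iff_mem_keys _ _).mpr h)
        simp [PySem.Set.add, PySem.Set.contains, hmem]
    rw [hkeys]
    rfl

theorem pvFoldB_ids (pm : List (List (String × String)))
    (acc : List String)
    (hpre : ∀ m ∈ pm, "device_id" ∈ m.map Prod.fst ∧ "posture_id" ∈ m.map Prod.fst) :
    (pm.foldl (fun acc m =>
        match pvGetKey m "device_id" with
        | some d => if acc.contains d then acc else acc ++ [d]
        | none => acc) acc)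
      = PySem.Set.update acc (pvIdsRaw pm) := by
  induction pm generalizing acc with
  | nil => rfl
  | cons m rest ih =>
    obtain ⟨hd, _⟩ := hpre m (List.mem_cons_self ..)
    obtain ⟨d, hd⟩ := Option.isSome_iff_exists.mp (pvGetKey_isSome m _ hd)
    have hrest := fun x hx => hpre x (List.mem_cons_of_mem _ hx)
    rw [List.foldl_cons]
    simp only [hd]
    rw [ih _ hrest]
    have hids : pvIdsRaw (m :: rest) = d :: pvIdsRaw rest := by
      simp [pvIdsRaw, hd]
    rw [hids]
    have : (if acc.contains d then acc else acc ++ [d]) = PySem.Set.add acc d := by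
      simp [PySem.Set.add, PySem.Set.contains]
    rw [this]
    rfl

-- ===== VERDICT (by name: the statement is the Claim_ definition above) =====
theorem build_device_postures_map_py_spec : Claim_equal_build_device_postures_map_py := by
  intro pm _ hpre
  unfold Spec_build_device_postures_map_py
  unfold build_device_postures_map_py build_device_postures_map_py_alt
  have hkeys := pvFoldA_keys pm PySem.Dict.empty hpre
  have hgetD := pvFoldA_getD pm PySem.Dict.empty hpre
  have hempty_keys : (PySem.Dict.empty : PySem.Dict String (PySem.Set String)).keys = [] := rfl
  rw [hempty_keys] at hkeys
  have hnodup : (pm.foldl (fun device_postures m =>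
        match pvGetKey m "device_id", pvGetKey m "posture_id" with
        | some d, some p => device_postures.modify d PySem.Set.empty (fun s => PySem.Set.add s p)
        | _, _ => device_postures) PySem.Dict.empty).keys.Nodup := by
    rw [hkeys]; exact PySem.Set.nodup_update _ _ List.nodup_nil
  rw [PySem.Dict.items_eq_map_keys _ hnodup PySem.Set.empty]
  rw [pvFoldB_ids pm [] hpre, hkeys]
  apply List.map_congr_left
  intro k _
  have : (PySem.Dict.empty : PySem.Dict String (PySem.Set String)).getD k PySem.Set.empty
      = PySem.Set.empty := rfl
  rw [hgetD k, this]
  have : PySem.Set.update PySem.Set.empty (pvVals pm k) = PySem.Set.ofList (pvVals pm k) :=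
    (PySem.Set.ofList_eq_foldl _).symm
  rw [this]
  rfl
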